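-- pv_equiv track=rewrite | github.com/pypi-data/pypi-mirror-11 | packages/AMP/AMP-1.1.4.tar.gz/AMP-1.1.4/AMP/amp.py | _indexOfPreviousOperator
-- ===== SOURCE A (Python) =====
-- _operatorSet = {"+", "-", "*", "/", "%", "^", "!"}
--
-- def _indexOfSpecificCharacters(string, characters):
--         return next((i for i, char in enumerate(string) if char in characters), -1)
--
-- def _indexOfSpecificOperators(expression, operators):
--         # Skips the first character when searching for operators
--         index = _indexOfSpecificCharacters(expression[1:], operators) + 1
--         if index == 0:
--                 return -1
--         return index
--
-- def _indexOfPreviousOperator(expression, currentIndex):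
--         # Iterates until the next index is the index you're looking for, then returns the index of the operator before it
--         lastIndex = -1
--         nextIndex = _indexOfSpecificOperators(expression, _operatorSet)
--         while nextIndex < currentIndex and nextIndex != lastIndex:
--                 lastIndex = nextIndex
--                 nextIndex = _indexOfSpecificOperators(expression[nextIndex + 1:], _operatorSet) + nextIndex + 1
--                 if nextIndex == lastIndex:
--                         break
--         return lastIndex
-- ===== SOURCE B (Python) =====
-- _operatorSet = {"+", "-", "*", "/", "%", "^", "!"}
--
-- def _indexOfPreviousOperator(expression, currentIndex):
--     # Single backward-free forward scan: walk indices 1 .. min(len, currentIndex)-1 once,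
--     # recording each operator index except one immediately following the last recorded one
--     # (that position is an operand sign, exactly as A's slicing walk skips it).
--     prev = -1
--     for i in range(1, min(len(expression), currentIndex)):
--         if expression[i] in _operatorSet and i != prev + 1:
--             prev = i
--     return prev
-- ===== Notes on version B (the rewrite author's own statement) =====
-- stated objective: simpler
-- what changed: Replaced A's iterated helper calls on freshly sliced suffix strings (re-searching a shifted copy each round) by one direct indexed pass that keeps the last accepted operator index in a single variable.
import Mathlib
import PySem

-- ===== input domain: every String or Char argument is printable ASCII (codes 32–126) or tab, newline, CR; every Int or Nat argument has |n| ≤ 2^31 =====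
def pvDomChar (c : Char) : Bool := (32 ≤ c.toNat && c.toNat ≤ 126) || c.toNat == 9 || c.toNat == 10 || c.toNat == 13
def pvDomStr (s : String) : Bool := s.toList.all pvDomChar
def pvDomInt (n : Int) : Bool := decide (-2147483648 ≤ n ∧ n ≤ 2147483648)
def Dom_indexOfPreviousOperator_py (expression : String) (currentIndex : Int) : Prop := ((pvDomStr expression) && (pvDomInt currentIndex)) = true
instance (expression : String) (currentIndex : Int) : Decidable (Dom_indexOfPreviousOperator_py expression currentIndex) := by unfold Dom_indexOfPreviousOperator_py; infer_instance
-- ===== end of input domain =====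

-- B replaces A's iterated helper calls on fresh suffix slices by one direct indexed scan
-- keeping the last accepted operator index (objective: simpler).

-- ===== PORT A =====
-- Python's _operatorSet holds 1-character strings and is only used in per-character
-- membership tests, so it is ported as a PySem.Set of Char (exact for those tests).
def pvOperatorSet : PySem.Set Char := PySem.Set.ofList ['+', '-', '*', '/', '%', '^', '!']

-- next((i for i, char in enumerate(string) if char in characters), -1)
def indexOfSpecificCharacters_py (string : List Char) (characters : PySem.Set Char) : Int :=
  match (PySem.List.enumerate string 0).find? (fun p => PySem.Set.contains characters p.2) with
  | some p => p.1
  | none => -1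

def indexOfSpecificOperators_py (expression : List Char) (operators : PySem.Set Char) : Int :=
  let index := indexOfSpecificCharacters_py (PySem.List.slice expression (some 1) none) operators + 1
  if index = 0 then -1 else index

-- bounds fact cited by loopA's decreasing_by (the port needs it for termination)
theorem pvIdxOps_bounds (l : List Char) (ops : PySem.Set Char) :
    indexOfSpecificOperators_py l ops = -1 ∨
      (1 ≤ indexOfSpecificOperators_py l ops ∧
       indexOfSpecificOperators_py l ops ≤ (l.length : Int) - 1) := by
  unfold indexOfSpecificOperators_py indexOfSpecificCharacters_py
  rw [PySem.List.slice_from_one]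
  cases hf : (PySem.List.enumerate l.tail 0).find? (fun p => PySem.Set.contains ops p.2) with
  | none => simp
  | some p =>
    have hm := List.mem_of_find?_eq_some hf
    rw [PySem.List.mem_enumerate_iff] at hm
    obtain ⟨k, hk, rfl⟩ := hm
    have hlt : l.tail.length ≤ l.length - 1 := by
      cases l <;> simp
    right
    simp only [zero_add]
    constructor <;> [omega; (push_cast; omega)]

-- the while-loop of _indexOfPreviousOperator
def loopA (l : List Char) (currentIndex lastIndex nextIndex : Int) : Int :=
  if nextIndex < currentIndex ∧ nextIndex ≠ lastIndex then
    let next' := indexOfSpecificOperators_py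
        (PySem.List.slice l (some (nextIndex + 1)) none) pvOperatorSet + nextIndex + 1
    if next' = nextIndex then nextIndex
    else loopA l currentIndex nextIndex next'
  else lastIndex
termination_by ((l.length : Int) + 1 - nextIndex).toNat
decreasing_by
  rename_i _h hne
  rcases pvIdxOps_bounds (PySem.List.slice l (some (nextIndex + 1)) none) pvOperatorSet with hr | ⟨hr1, hr2⟩
  · exact absurd (by omega) hne
  · by_cases hnn : 0 ≤ nextIndex + 1
    · have hlen : ((PySem.List.slice l (some (nextIndex + 1)) none).length : Int)
          = ((l.length - (nextIndex + 1).toNat : Nat) : Int) := by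
        rw [PySem.List.slice_from l hnn, List.length_drop]
      omega
    · omega

def indexOfPreviousOperator_py (expression : String) (currentIndex : Int) : Int :=
  loopA expression.toList currentIndex (-1)
    (indexOfSpecificOperators_py expression.toList pvOperatorSet)

-- ===== PORT B =====
def indexOfPreviousOperator_py_alt (expression : String) (currentIndex : Int) : Int :=
  (PySem.List.pyRange 1 (min (expression.toList.length : Int) currentIndex) 1).foldl
    (fun prev i =>
      match PySem.List.pyGet? expression.toList i with
      | some c => if PySem.Set.contains pvOperatorSet c = true ∧ i ≠ prev + 1 then i else prev
      | none => prev)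
    (-1)

-- ===== PRECONDITION & SPEC =====
def Spec_indexOfPreviousOperator_py (expression : String) (currentIndex : Int) (out : Int) : Prop := out = indexOfPreviousOperator_py_alt expression currentIndex
instance (expression : String) (currentIndex : Int) (out : Int) : Decidable (Spec_indexOfPreviousOperator_py expression currentIndex out) := by unfold Spec_indexOfPreviousOperator_py; infer_instance

-- ===== CLAIM (what is proved, stated in full; the proofs are below) =====
def Claim_equal_indexOfPreviousOperator_py : Prop := ∀ (expression : String) (currentIndex : Int), Dom_indexOfPreviousOperator_py expression currentIndex → Spec_indexOfPreviousOperator_py expression currentIndex (indexOfPreviousOperator_py expression currentIndex)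

-- ===== LEMMAS AND PROOFS =====

-- the operator predicate on single characters
def pvP (c : Char) : Bool := PySem.Set.contains pvOperatorSet c

-- the loop body of B, as a named function (definitionally the lambda in the port of B)
def pvBody (l : List Char) (prev i : Int) : Int :=
  match PySem.List.pyGet? l i with
  | some c => if PySem.Set.contains pvOperatorSet c = true ∧ i ≠ prev + 1 then i else prev
  | none => prev

-- B's fold over an arbitrary index range
def pvFB (l : List Char) (a b prev : Int) : Int :=
  (PySem.List.pyRange a b 1).foldl (pvBody l) prev

theorem pvAlt_eq_FB (e : String) (cur : Int) :
    indexOfPreviousOperator_py_alt e cur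
      = pvFB e.toList 1 (min (e.toList.length : Int) cur) (-1) := rfl

theorem pvBody_skip_eq (l : List Char) (prev : Int) : pvBody l prev (prev + 1) = prev := by
  unfold pvBody
  cases PySem.List.pyGet? l (prev + 1) <;> simp

theorem pvBody_get (l : List Char) (prev i : Int) (h0 : 0 ≤ i) (hi : i.toNat < l.length) :
    pvBody l prev i = if pvP l[i.toNat] = true ∧ i ≠ prev + 1 then i else prev := by
  unfold pvBody pvP
  rw [PySem.List.pyGet?_of_nonneg l h0, List.getElem?_eq_getElem hi]

theorem pvFB_nil (l : List Char) {a b : Int} (prev : Int) (h : b ≤ a) :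
    pvFB l a b prev = prev := by
  unfold pvFB; rw [PySem.List.pyRange_one_eq_nil h]; rfl

theorem pvFB_cons (l : List Char) {a b : Int} (prev : Int) (h : a < b) :
    pvFB l a b prev = pvFB l (a + 1) b (pvBody l prev a) := by
  unfold pvFB; rw [PySem.List.pyRange_one_cons h]; rfl

theorem pvFB_split (l : List Char) {a m b : Int} (prev : Int) (h1 : a ≤ m) (h2 : m ≤ b) :
    pvFB l a b prev = pvFB l m b (pvFB l a m prev) := by
  unfold pvFB; rw [PySem.List.pyRange_one_append a m b h1 h2, List.foldl_append]

theorem pvFB_skip (l : List Char) {b : Int} (prev : Int)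
    (a : Int) (h : ∀ i : Int, a ≤ i → i < b → pvBody l prev i = prev) :
    pvFB l a b prev = prev := by
  have key : ∀ n : Nat, ∀ a : Int, (b - a).toNat = n →
      (∀ i : Int, a ≤ i → i < b → pvBody l prev i = prev) → pvFB l a b prev = prev := by
    intro n
    induction n with
    | zero => intro a hn _; exact pvFB_nil l prev (by omega)
    | succ k ih =>
      intro a hn h
      have hab : a < b := by omega
      rw [pvFB_cons l prev hab, h a le_rfl hab]
      exact ih (a + 1) (by omega) (fun i h1 h2 => h i (by omega) h2)
  exact key _ a rfl h

-- "prev stays fixed" over a segment containing no acceptable operator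
theorem pvFB_const (l : List Char) (p b : Int) (hp : -1 ≤ p) (hbL : b ≤ (l.length : Int))
    (h : ∀ j : Nat, (hj : j < l.length) → p + 2 ≤ (j : Int) → (j : Int) < b → pvP l[j] = false) :
    pvFB l (p + 1) b p = p := by
  apply pvFB_skip
  intro i h1 h2
  by_cases hip : i = p + 1
  · rw [hip]; exact pvBody_skip_eq l p
  · have h0 : 0 ≤ i := by omega
    have hc : (i.toNat : Int) = i := Int.toNat_of_nonneg h0
    have hi : i.toNat < l.length := by omega
    rw [pvBody_get l p i h0 hi, h i.toNat hi (by omega) (by omega)]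
    simp

-- crossing the next accepted operator q
theorem pvFB_cross (l : List Char) (p q b : Int) (hp : -1 ≤ p) (hpq : p + 2 ≤ q)
    (hqb : q < b) (hbL : b ≤ (l.length : Int))
    (hqL : q.toNat < l.length) (hq : pvP l[q.toNat] = true)
    (hno : ∀ j : Nat, (hj : j < l.length) → p + 2 ≤ (j : Int) → (j : Int) < q → pvP l[j] = false) :
    pvFB l (p + 1) b p = pvFB l (q + 1) b q := by
  rw [pvFB_split l p (show p + 1 ≤ q by omega) (show q ≤ b by omega)]
  rw [pvFB_const l p q hp (by omega) (fun j hj hj1 hj2 => hno j hj hj1 (by omega))]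
  rw [pvFB_cons l p hqb]
  rw [pvBody_get l p q (by omega) hqL, if_pos ⟨hq, by omega⟩]

-- find over enumerate computes findIdx?
theorem pvFind_aux (P : Char → Bool) (l : List Char) : ∀ s : Int,
    (match (PySem.List.enumerate l s).find? (fun p => P p.2) with
     | some p => p.1
     | none => (-1 : Int))
    = (match l.findIdx? P with | some k => s + (k : Int) | none => -1) := by
  induction l with
  | nil => intro s; simp [PySem.List.enumerate_nil, List.findIdx?_nil]
  | cons x xs ih =>
    intro s
    rw [PySem.List.enumerate_cons, List.find?_cons, List.findIdx?_cons]
    cases hx : P x with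
    | true => simp
    | false =>
      rw [ih (s + 1)]
      cases hfi : xs.findIdx? P with
      | none => rfl
      | some k => simp; ring

theorem pvIdxChars_eq (l : List Char) :
    indexOfSpecificCharacters_py l pvOperatorSet
      = (match l.findIdx? pvP with | some k => (k : Int) | none => -1) := by
  unfold indexOfSpecificCharacters_py
  have h := pvFind_aux pvP l 0
  rw [show (fun p : Int × Char => PySem.Set.contains pvOperatorSet p.2)
        = (fun p : Int × Char => pvP p.2) from rfl, h]
  cases l.findIdx? pvP with
  | none => rfl
  | some k => simp

theorem pvIdxOps_eq (l : List Char) :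
    indexOfSpecificOperators_py l pvOperatorSet
      = (match (l.drop 1).findIdx? pvP with | some k => (k : Int) + 1 | none => -1) := by
  unfold indexOfSpecificOperators_py
  rw [PySem.List.slice_from_one, ← List.drop_one, pvIdxChars_eq]
  cases hf : (l.drop 1).findIdx? pvP with
  | none => norm_num
  | some k =>
    show (if (k : Int) + 1 = 0 then (-1 : Int) else (k : Int) + 1) = (k : Int) + 1
    split_ifs <;> omega

-- move a getElem through List.drop
theorem pvDropGet (l : List Char) (d j : Nat) (h1 : d ≤ j) (hj : j < l.length)
    (h2 : j - d < (l.drop d).length) : (l.drop d)[j - d] = l[j] := by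
  have h3 : (l.drop d)[j - d]? = l[j]? := by
    rw [List.getElem?_drop]
    congr 1
    omega
  rw [List.getElem?_eq_getElem h2, List.getElem?_eq_getElem hj] at h3
  exact Option.some.inj h3

-- "no operator from position d+1 on" when the helper returns -1
theorem pvIdxOps_none_spec (l : List Char) (d : Nat)
    (h : indexOfSpecificOperators_py (l.drop d) pvOperatorSet = -1) :
    ∀ j : Nat, (hj : j < l.length) → d + 1 ≤ j → pvP l[j] = false := by
  rw [pvIdxOps_eq, List.drop_drop] at h
  intro j hj hdj
  cases hf : (l.drop (d + 1)).findIdx? pvP with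
  | some k =>
    rw [hf] at h
    exact absurd (show (k : Int) + 1 = -1 from h) (by omega)
  | none =>
    rw [List.findIdx?_eq_none_iff] at hf
    have hjd : j - (d + 1) < (l.drop (d + 1)).length := by
      rw [List.length_drop]; omega
    have := hf _ (List.getElem_mem hjd)
    rwa [pvDropGet l (d + 1) j (by omega) hj] at this

-- the helper's non-(-1) result is the first operator position strictly after d
theorem pvIdxOps_some_spec (l : List Char) (d : Nat) (r : Int)
    (h : indexOfSpecificOperators_py (l.drop d) pvOperatorSet = r) (hr : r ≠ -1) :
    ∃ nn : Nat, ∃ hnn : nn < l.length, (nn : Int) = r + (d : Int) ∧ d + 1 ≤ nn ∧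
      pvP l[nn] = true ∧
      ∀ j : Nat, (hj : j < l.length) → d + 1 ≤ j → j < nn → pvP l[j] = false := by
  rw [pvIdxOps_eq, List.drop_drop] at h
  cases hf : (l.drop (d + 1)).findIdx? pvP with
  | none =>
    rw [hf] at h
    exact absurd (show ((-1 : Int) = r) from h).symm hr
  | some k =>
    rw [hf] at h
    have hkr : (k : Int) + 1 = r := h
    rw [List.findIdx?_eq_some_iff_getElem] at hf
    obtain ⟨hk, hPk, hmin⟩ := hf
    have hkL : k < l.length - (d + 1) := by rwa [List.length_drop] at hk
    refine ⟨d + 1 + k, by omega, by omega, by omega, ?_, ?_⟩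
    · rwa [List.getElem_drop] at hPk
    · intro j hj hdj hjk
      have hjd : j - (d + 1) < (l.drop (d + 1)).length := by rw [List.length_drop]; omega
      have := hmin (j - (d + 1)) (by omega)
      rw [pvDropGet l (d + 1) j (by omega) hj] at this
      simpa using this

-- MAIN: A's while loop equals B's fold, for any state reachable with lastIndex ≥ -1
theorem pvMain (l : List Char) (cur : Int) :
    ∀ n : Nat, ∀ last next : Int,
      ((l.length : Int) + 1 - next).toNat = n →
      -1 ≤ last →
      next = indexOfSpecificOperators_py (PySem.List.slice l (some (last + 1)) none)
               pvOperatorSet + last + 1 →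
      loopA l cur last next = pvFB l (last + 1) (min (l.length : Int) cur) last := by
  intro n
  induction n using Nat.strong_induction_on with
  | _ n ih =>
    intro last next hn hlast hnext
    have hd : PySem.List.slice l (some (last + 1)) none = l.drop (last + 1).toNat :=
      PySem.List.slice_from l (by omega)
    rw [hd] at hnext
    have hdc : ((last + 1).toNat : Int) = last + 1 := Int.toNat_of_nonneg (by omega)
    rw [loopA]
    by_cases hg : next < cur ∧ next ≠ last
    · obtain ⟨hc, hne⟩ := hg
      rw [if_pos ⟨hc, hne⟩]
      -- the helper found an operator: next is its absolute position
      have hr : indexOfSpecificOperators_py (l.drop (last + 1).toNat) pvOperatorSet ≠ -1 := by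
        intro h0; rw [h0] at hnext; omega
      obtain ⟨nn, hnn, hnI, hd1, hPnn, hno⟩ :=
        pvIdxOps_some_spec l (last + 1).toNat _ rfl hr
      have hnext' : next = (nn : Int) := by omega
      have hnL : next < (l.length : Int) := by omega
      have hM : next < min (l.length : Int) cur := by omega
      have hcross : pvFB l (last + 1) (min (l.length : Int) cur) last
          = pvFB l ((nn : Int) + 1) (min (l.length : Int) cur) (nn : Int) := by
        apply pvFB_cross l last ((nn : Int)) _ hlast (by omega) (by omega) (by omega)
          (by simpa using hnn)
        · simpa using hPnn
        · intro j hj h1 h2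
          exact hno j hj (by omega) (by omega)
      rw [hcross]
      show (if indexOfSpecificOperators_py (PySem.List.slice l (some (next + 1)) none)
              pvOperatorSet + next + 1 = next
            then next
            else loopA l cur next (indexOfSpecificOperators_py
              (PySem.List.slice l (some (next + 1)) none) pvOperatorSet + next + 1)) = _
      have hd2 : PySem.List.slice l (some (next + 1)) none = l.drop (next + 1).toNat :=
        PySem.List.slice_from l (by omega)
      have hdc2 : ((next + 1).toNat : Int) = next + 1 := Int.toNat_of_nonneg (by omega)
      by_cases hb : indexOfSpecificOperators_py (PySem.List.slice l (some (next + 1)) none)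
          pvOperatorSet + next + 1 = next
      · rw [if_pos hb]
        -- no further operator: the fold never changes prev = next again
        have hr2 : indexOfSpecificOperators_py (l.drop (next + 1).toNat) pvOperatorSet = -1 := by
          rw [hd2] at hb; omega
        rw [pvFB_const l (nn : Int) _ (by omega) (by omega)
          (fun j hj h1 h2 => pvIdxOps_none_spec l (next + 1).toNat hr2 j hj (by omega))]
        exact hnext'
      · rw [if_neg hb]
        -- measure decreases: the next found index is ≥ next + 2 and < length
        rcases pvIdxOps_bounds (PySem.List.slice l (some (next + 1)) none) pvOperatorSet
          with h0 | ⟨h1, h2⟩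
        · exact absurd (by rw [h0]; ring) hb
        · have hlen : ((PySem.List.slice l (some (next + 1)) none).length : Int)
              = ((l.length - (next + 1).toNat : Nat) : Int) := by
            rw [hd2, List.length_drop]
          rw [ih _ (by omega) next _ rfl (by omega) (by rw [hd2]), hnext']
    · rw [if_neg hg]
      symm
      apply pvFB_const l last _ hlast (by omega)
      intro j hj h1 h2
      by_cases hr : indexOfSpecificOperators_py (l.drop (last + 1).toNat) pvOperatorSet = -1
      · exact pvIdxOps_none_spec l (last + 1).toNat hr j hj (by omega)
      · obtain ⟨nn, hnn, hnI, hd1, hPnn, hno⟩ :=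
          pvIdxOps_some_spec l (last + 1).toNat _ rfl hr
        have hnext' : next = (nn : Int) := by omega
        -- the guard failed: either next = last (impossible here) or next ≥ cur
        have hge : cur ≤ next := by
          rcases not_and_or.mp hg with h | h
          · omega
          · exfalso; apply h; omega
        exact hno j hj (by omega) (by omega)


-- ===== VERDICT (by name: the statement is the Claim_ definition above) =====
theorem indexOfPreviousOperator_py_spec : Claim_equal_indexOfPreviousOperator_py := by
  intro e cur _
  unfold Spec_indexOfPreviousOperator_py indexOfPreviousOperator_py
  have h0 : indexOfSpecificOperators_py e.toList pvOperatorSet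
      = indexOfSpecificOperators_py (PySem.List.slice e.toList (some ((-1) + 1)) none)
          pvOperatorSet + -1 + 1 := by
    norm_num [PySem.List.slice_zero_start, PySem.List.slice_none_none]
  rw [h0, pvMain e.toList cur _ (-1) _ rfl (by omega) rfl, pvAlt_eq_FB]
  have hbridge : ∀ b : Int, pvFB e.toList 0 b (-1) = pvFB e.toList 1 b (-1) := by
    intro b
    by_cases hM : 0 < b
    · rw [pvFB_cons e.toList (-1) hM]
      have h1 := pvBody_skip_eq e.toList (-1)
      norm_num at h1
      rw [h1]
      norm_num
    · rw [pvFB_nil e.toList (-1) (by omega), pvFB_nil e.toList (-1) (by omega)]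
  exact hbridge _
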